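-- pv_equiv track=rewrite | github.com/msrosenberg/ImpactFactor | ImpactFactorCalculator.py | calculate_woeginger_w
-- ===== SOURCE A (Python) =====
-- def calculate_woeginger_w(n: int, rankorder: list, cites: list) -> int:
--     woeginger_w_index = 0
--     for j in range(n):
--         tmp_good = True
--         for i in range(n):
--             if rankorder[i] <= j:
--                 if cites[i] < j - rankorder[i] + 1:
--                     tmp_good = False
--         if tmp_good:
--             woeginger_w_index = j
--     return woeginger_w_index
-- ===== SOURCE B (Python) =====
-- def calculate_woeginger_w(n: int, rankorder: list, cites: list) -> int:
--     if n <= 0: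
--         return 0
--     m = min(max(r, c + r) for r, c in zip(rankorder[:n], cites[:n]))
--     return max(0, min(n - 1, m - 1))
-- ===== Notes on version B (the rewrite author's own statement) =====
-- stated objective: faster
-- what changed: Replaced the O(n^2) double loop by the closed form: the answer is min over the first n entries of max(rank, cites+rank), minus one, clamped into [0, n-1], computed in a single pass.
-- outside the precondition, e.g. on calculate_woeginger_w(4, [4, 10, 21, 6, 0], []): A returns 3, B raises ValueError
import Mathlib
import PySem

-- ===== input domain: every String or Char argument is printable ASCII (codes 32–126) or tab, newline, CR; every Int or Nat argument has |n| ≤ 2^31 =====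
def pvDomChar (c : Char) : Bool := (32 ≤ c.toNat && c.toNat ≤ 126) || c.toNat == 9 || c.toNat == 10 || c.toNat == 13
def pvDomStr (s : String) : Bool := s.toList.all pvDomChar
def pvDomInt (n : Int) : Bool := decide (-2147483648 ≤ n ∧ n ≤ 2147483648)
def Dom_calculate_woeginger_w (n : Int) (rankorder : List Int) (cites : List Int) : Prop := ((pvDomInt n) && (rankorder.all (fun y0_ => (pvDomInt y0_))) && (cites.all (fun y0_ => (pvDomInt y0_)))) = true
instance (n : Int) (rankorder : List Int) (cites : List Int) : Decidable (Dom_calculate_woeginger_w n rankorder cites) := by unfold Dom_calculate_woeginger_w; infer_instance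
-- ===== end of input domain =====

-- B replaces A's O(n^2) double scan by a single pass: w = clamp of min_i max(rank_i, cites_i+rank_i) - 1 into [0, n-1].

-- ===== PORT A =====
def calculate_woeginger_w (n : Int) (rankorder : List Int) (cites : List Int) : Int :=
  (PySem.List.pyRange 0 n 1).foldl (fun woeginger_w_index j =>
    let tmp_good := (PySem.List.pyRange 0 n 1).foldl (fun tmp_good i =>
      if PySem.List.pyGetD rankorder i 0 ≤ j then
        if PySem.List.pyGetD cites i 0 < j - PySem.List.pyGetD rankorder i 0 + 1 then false
        else tmp_good
      else tmp_good) true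
    if tmp_good then j else woeginger_w_index) 0

-- ===== PORT B =====
def calculate_woeginger_w_alt (n : Int) (rankorder : List Int) (cites : List Int) : Int :=
  if n ≤ 0 then 0
  else
    let m := (PySem.List.min?
      (((PySem.List.slice rankorder none (some n)).zip (PySem.List.slice cites none (some n))).map
        (fun p => max p.1 (p.2 + p.1))) (fun x => x)).getD 0
    max 0 (min (n - 1) (m - 1))

-- ===== PRECONDITION & SPEC =====
-- Pre_ excludes inputs where n exceeds a list's length: there A generically raises IndexError, though when
-- every rankorder entry stays above all j it never touches cites[i] and still returns, a lazy-indexing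
-- accident B's single pass (which always reads both lists) does not reproduce.
def Pre_calculate_woeginger_w (n : Int) (rankorder : List Int) (cites : List Int) : Prop :=
  n ≤ rankorder.length ∧ n ≤ cites.length
instance (n : Int) (rankorder : List Int) (cites : List Int) : Decidable (Pre_calculate_woeginger_w n rankorder cites) := by unfold Pre_calculate_woeginger_w; infer_instance
def pvWitness_calculate_woeginger_w : Int × List Int × List Int := (3, [1, 2, 3], [4, 2, 1])
def Spec_calculate_woeginger_w (n : Int) (rankorder : List Int) (cites : List Int) (out : Int) : Prop := out = calculate_woeginger_w_alt n rankorder cites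
instance (n : Int) (rankorder : List Int) (cites : List Int) (out : Int) : Decidable (Spec_calculate_woeginger_w n rankorder cites out) := by unfold Spec_calculate_woeginger_w; infer_instance

-- ===== CLAIM (what is proved, stated in full; the proofs are below) =====
def Claim_equal_calculate_woeginger_w : Prop := ∀ (n : Int) (rankorder : List Int) (cites : List Int), Dom_calculate_woeginger_w n rankorder cites → Pre_calculate_woeginger_w n rankorder cites → Spec_calculate_woeginger_w n rankorder cites (calculate_woeginger_w n rankorder cites)

-- ===== LEMMAS AND PROOFS =====

-- A's outer loop keeps the LAST j with 'j < M'; since that test is downward closed the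
-- result is the clamped threshold.
lemma foldl_threshold (M : Int) : ∀ (d : Nat) (a b w0 : Int), b - a ≤ (d : Int) →
    (PySem.List.pyRange a b 1).foldl (fun w j => if j < M then j else w) w0 =
      if a < M ∧ a < b then min b M - 1 else w0 := by
  intro d
  induction d with
  | zero =>
    intro a b w0 hd
    rw [PySem.List.pyRange_one_eq_nil (by omega)]
    simp only [List.foldl_nil]
    have : ¬ (a < M ∧ a < b) := by omega
    simp [this]
  | succ d ih =>
    intro a b w0 hd
    by_cases hab : a < b
    · rw [PySem.List.pyRange_one_cons hab]
      simp only [List.foldl_cons]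
      rw [ih (a + 1) b _ (by omega)]
      by_cases h1 : a < M
      · simp only [if_pos h1]
        by_cases h2 : a + 1 < M ∧ a + 1 < b
        · rw [if_pos h2, if_pos ⟨h1, hab⟩]
        · rw [if_neg h2, if_pos ⟨h1, hab⟩]
          omega
      · simp only [if_neg h1]
        rw [if_neg (by omega), if_neg (by omega)]
    · rw [PySem.List.pyRange_one_eq_nil (by omega)]
      simp only [List.foldl_nil]
      rw [if_neg (by omega)]

lemma inner_fold_eq (n j : Int) (rankorder cites : List Int) :
    (PySem.List.pyRange 0 n 1).foldl (fun tmp_good i =>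
      if PySem.List.pyGetD rankorder i 0 ≤ j then
        if PySem.List.pyGetD cites i 0 < j - PySem.List.pyGetD rankorder i 0 + 1 then false
        else tmp_good
      else tmp_good) true =
    !((PySem.List.pyRange 0 n 1).any (fun i =>
        decide (max (PySem.List.pyGetD rankorder i 0)
          (PySem.List.pyGetD cites i 0 + PySem.List.pyGetD rankorder i 0) ≤ j))) := by
  rw [PySem.List.foldl_congr_mem _ _
      (fun tmp_good i =>
        if (decide (max (PySem.List.pyGetD rankorder i 0)
            (PySem.List.pyGetD cites i 0 + PySem.List.pyGetD rankorder i 0) ≤ j)) then false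
        else tmp_good) _
      (by
        intro acc i _
        dsimp only
        simp only [decide_eq_true_eq]
        by_cases h : max (PySem.List.pyGetD rankorder i 0)
            (PySem.List.pyGetD cites i 0 + PySem.List.pyGetD rankorder i 0) ≤ j
        · rw [if_pos h]
          rw [max_le_iff] at h
          rw [if_pos (by omega), if_pos (by omega)]
        · rw [if_neg h]
          rw [max_le_iff] at h
          by_cases h1 : PySem.List.pyGetD rankorder i 0 ≤ j
          · rw [if_pos h1, if_neg (by omega)]
          · rw [if_neg h1])]
  rw [PySem.List.foldl_if_false_eq]
  simp

-- membership description of the list B minimises over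
lemma mem_mapped_iff (k : Nat) (rankorder cites : List Int)
    (hr : k ≤ rankorder.length) (hc : k ≤ cites.length) (y : Int) :
    (y ∈ ((rankorder.take k).zip (cites.take k)).map (fun p => max p.1 (p.2 + p.1))) ↔
      ∃ i : Nat, i < k ∧ y = max rankorder[i]! (cites[i]! + rankorder[i]!) := by
  rw [List.mem_map]
  constructor
  · rintro ⟨p, hp, rfl⟩
    rw [List.mem_iff_getElem] at hp
    obtain ⟨i, hi, hpi⟩ := hp
    have hlen : ((rankorder.take k).zip (cites.take k)).length = k := by
      simp [List.length_zip]; omega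
    refine ⟨i, by omega, ?_⟩
    have hik : i < k := by omega
    have : p = (rankorder[i], cites[i]) := by
      rw [← hpi]
      rw [List.getElem_zip]
      congr 1 <;> rw [List.getElem_take]
    rw [this]
    simp only
    rw [getElem!_pos rankorder i (by omega), getElem!_pos cites i (by omega)]
  · rintro ⟨i, hik, rfl⟩
    refine ⟨(rankorder[i]!, cites[i]!), ?_, rfl⟩
    rw [List.mem_iff_getElem]
    have hlen : ((rankorder.take k).zip (cites.take k)).length = k := by
      simp [List.length_zip]; omega
    refine ⟨i, by omega, ?_⟩
    rw [List.getElem_zip]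
    rw [getElem!_pos rankorder i (by omega), getElem!_pos cites i (by omega)]
    congr 1 <;> rw [List.getElem_take]

-- ===== VERDICT (by name: the statement is the Claim_ definition above) =====
theorem calculate_woeginger_w_spec : Claim_equal_calculate_woeginger_w := by
  intro n rankorder cites _hdom hpre
  obtain ⟨hr, hc⟩ := hpre
  unfold Spec_calculate_woeginger_w calculate_woeginger_w calculate_woeginger_w_alt
  by_cases hn : n ≤ 0
  · rw [if_pos hn, PySem.List.pyRange_one_eq_nil (by omega)]
    simp
  · rw [if_neg hn]
    set k := n.toNat with hk
    have hkn : (k : Int) = n := by omega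
    have hkr : k ≤ rankorder.length := by omega
    have hkc : k ≤ cites.length := by omega
    -- the list B minimises over
    have hslice : PySem.List.slice rankorder none (some n) = rankorder.take k :=
      PySem.List.slice_to rankorder (by omega)
    have hslice2 : PySem.List.slice cites none (some n) = cites.take k :=
      PySem.List.slice_to cites (by omega)
    rw [hslice, hslice2]
    set L := ((rankorder.take k).zip (cites.take k)).map (fun p => max p.1 (p.2 + p.1)) with hL
    have hLlen : L.length = k := by
      simp [hL, List.length_zip]; omega
    have hLne : L ≠ [] := by
      intro h; rw [h] at hLlen; simp at hLlen; omega
    obtain ⟨M, hM⟩ : ∃ M, PySem.List.min? L (fun x => x) = some M := by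
      cases hmin : PySem.List.min? L (fun x => x) with
      | none => exact absurd ((PySem.List.min?_eq_none_iff L (fun x => x)).mp hmin) hLne
      | some M => exact ⟨M, rfl⟩
    rw [hM]
    simp only [Option.getD_some]
    have hMmem : M ∈ L := PySem.List.min?_mem hM
    have hMmin : ∀ y ∈ L, M ≤ y := by
      intro y hy; exact PySem.List.min?_isMin hM y hy
    -- inner test: good j ↔ j < M
    have hgood : ∀ j : Int,
        (!((PySem.List.pyRange 0 n 1).any (fun i =>
          decide (max (PySem.List.pyGetD rankorder i 0)
            (PySem.List.pyGetD cites i 0 + PySem.List.pyGetD rankorder i 0) ≤ j)))) = decide (j < M) := by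
      intro j
      by_cases hjM : j < M
      · simp only [decide_eq_true hjM]
        rw [Bool.not_eq_true']
        rw [List.any_eq_false]
        intro i hi
        rw [PySem.List.mem_pyRange_one] at hi
        have hi0 : 0 ≤ i := hi.1
        have hin : i < n := hi.2
        have h1 : PySem.List.pyGetD rankorder i 0 = rankorder[i.toNat] :=
          PySem.List.pyGetD_eq_getElem rankorder 0 hi0 (by omega)
        have h2 : PySem.List.pyGetD cites i 0 = cites[i.toNat] :=
          PySem.List.pyGetD_eq_getElem cites 0 hi0 (by omega)
        have hmem : max rankorder[i.toNat]! (cites[i.toNat]! + rankorder[i.toNat]!) ∈ L :=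
          (mem_mapped_iff k rankorder cites hkr hkc _).mpr ⟨i.toNat, by omega, rfl⟩
        have := hMmin _ hmem
        rw [getElem!_pos rankorder i.toNat (by omega), getElem!_pos cites i.toNat (by omega),
          le_max_iff] at this
        simp only [h1, h2, decide_eq_true_eq, max_le_iff]
        omega
      · simp only [decide_eq_false hjM]
        have hany : ((PySem.List.pyRange 0 n 1).any (fun i =>
            decide (max (PySem.List.pyGetD rankorder i 0)
              (PySem.List.pyGetD cites i 0 + PySem.List.pyGetD rankorder i 0) ≤ j))) = true := by
          rw [List.any_eq_true]
          obtain ⟨i, hik, hMi⟩ := (mem_mapped_iff k rankorder cites hkr hkc M).mp hMmem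
          refine ⟨(i : Int), ?_, ?_⟩
          · rw [PySem.List.mem_pyRange_one]; omega
          · have h1 : PySem.List.pyGetD rankorder (i : Int) 0 = rankorder[i] := by
              rw [PySem.List.pyGetD_eq_getElem rankorder 0 (by omega) (by omega)]
              simp
            have h2 : PySem.List.pyGetD cites (i : Int) 0 = cites[i] := by
              rw [PySem.List.pyGetD_eq_getElem cites 0 (by omega) (by omega)]
              simp
            rw [getElem!_pos rankorder i (by omega), getElem!_pos cites i (by omega)] at hMi
            simp only [h1, h2, decide_eq_true_eq, ← hMi]
            omega
        rw [hany]
        rfl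
    -- rewrite the outer loop body
    rw [PySem.List.foldl_congr_mem _ _
        (fun w j => if j < M then j else w) _
        (by
          intro acc j _
          simp only [inner_fold_eq n j rankorder cites, hgood j]
          by_cases h : j < M
          · simp [h]
          · simp [h])]
    rw [foldl_threshold M (n.toNat) 0 n 0 (by omega)]
    by_cases h0 : 0 < M
    · rw [if_pos ⟨h0, by omega⟩]; omega
    · rw [if_neg (by omega)]; omega
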